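-- pv_equiv track=rewrite | github.com/ug911/athena-agent | scripts/sync_schemas.py | pick_recency_column
-- ===== SOURCE A (Python) =====
-- RECENCY_CANDIDATES = ["created_at", "updated_at", "event_time", "_ts", "ts", "created", "updated"]
--
-- def pick_recency_column(columns: list[tuple[str, str, str]], override: str | None) -> str | None:
--     if override:
--         return override
--     names = {c[0].lower(): c[0] for c in columns}
--     for cand in RECENCY_CANDIDATES:
--         if cand in names:
--             return names[cand]
--     return None
-- ===== SOURCE B (Python) =====
-- RECENCY_CANDIDATES = ["created_at", "updated_at", "event_time", "_ts", "ts", "created", "updated"]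
--
-- def pick_recency_column(columns: list[tuple[str, str, str]], override: str | None) -> str | None:
--     if override:
--         return override
--     rank = {name: i for i, name in enumerate(RECENCY_CANDIDATES)}
--     best = None  # (rank, original name); last column wins on equal rank
--     for c in columns:
--         i = rank.get(c[0].lower())
--         if i is not None and (best is None or i <= best[0]):
--             best = (i, c[0])
--     return best[1] if best is not None else None
-- ===== Notes on version B (the rewrite author's own statement) =====
-- stated objective: alternative
-- what changed: Instead of building a lower->original dict over all columns and probing it once per candidate, B builds a fixed candidate->priority dict and makes one pass over the columns tracking the best-ranked match (last occurrence wins on equal rank).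
import Mathlib
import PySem

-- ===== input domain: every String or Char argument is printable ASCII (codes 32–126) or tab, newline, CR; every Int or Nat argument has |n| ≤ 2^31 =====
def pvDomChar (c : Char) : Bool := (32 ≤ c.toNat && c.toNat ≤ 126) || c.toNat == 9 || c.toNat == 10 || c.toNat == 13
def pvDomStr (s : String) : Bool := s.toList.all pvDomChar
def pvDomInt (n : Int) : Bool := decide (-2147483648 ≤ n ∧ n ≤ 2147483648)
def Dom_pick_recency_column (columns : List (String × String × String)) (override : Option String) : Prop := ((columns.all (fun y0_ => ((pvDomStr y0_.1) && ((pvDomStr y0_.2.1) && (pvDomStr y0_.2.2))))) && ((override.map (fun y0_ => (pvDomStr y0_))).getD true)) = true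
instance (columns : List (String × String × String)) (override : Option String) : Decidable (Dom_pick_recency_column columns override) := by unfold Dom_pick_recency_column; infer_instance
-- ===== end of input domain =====

-- B replaces A's lower->original dict probed once per candidate by a candidate->priority
-- dict and a single pass over the columns tracking the best-ranked match (alternative
-- decomposition, similar cost).

def RECENCY_CANDIDATES : List String := ["created_at", "updated_at", "event_time", "_ts", "ts", "created", "updated"]

-- ===== PORT A =====
-- names = {c[0].lower(): c[0] for c in columns}
def pickA_names (columns : List (String × String × String)) : PySem.Dict String String :=
  columns.foldl (fun d c => d.insert (PySem.Str.lower c.1) c.1) PySem.Dict.empty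

-- for cand in RECENCY_CANDIDATES: if cand in names: return names[cand]
def pickA_loop (ks : List String) (d : PySem.Dict String String) : Option String :=
  match ks with
  | [] => none
  | k :: ks => match d.get? k with
    | some v => some v
    | none => pickA_loop ks d

def pick_recency_column (columns : List (String × String × String)) (override : Option String) : Option String :=
  if (override.getD "") ≠ "" then override   -- `if override:` — None and "" are falsy
  else pickA_loop RECENCY_CANDIDATES (pickA_names columns)

-- ===== PORT B =====
-- rank = {name: i for i, name in enumerate(RECENCY_CANDIDATES)}
def pickB_rank : PySem.Dict String Int :=
  (PySem.List.enumerate RECENCY_CANDIDATES 0).foldl (fun d p => d.insert p.2 p.1) PySem.Dict.empty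

-- loop body: i = rank.get(c[0].lower()); if i is not None and (best is None or i <= best[0]): best = (i, c[0])
def pickB_step (best : Option (Int × String)) (c : String × String × String) : Option (Int × String) :=
  match pickB_rank.get? (PySem.Str.lower c.1) with
  | none => best
  | some i => match best with
    | none => some (i, c.1)
    | some (j, _) => if i ≤ j then some (i, c.1) else best

def pick_recency_column_alt (columns : List (String × String × String)) (override : Option String) : Option String :=
  if (override.getD "") ≠ "" then override
  else (columns.foldl pickB_step none).map (·.2)

-- ===== PRECONDITION & SPEC =====
def Spec_pick_recency_column (columns : List (String × String × String)) (override : Option String) (out : Option String) : Prop := out = pick_recency_column_alt columns override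
instance (columns : List (String × String × String)) (override : Option String) (out : Option String) : Decidable (Spec_pick_recency_column columns override out) := by unfold Spec_pick_recency_column; infer_instance

-- ===== CLAIM (what is proved, stated in full; the proofs are below) =====
def Claim_equal_pick_recency_column : Prop := ∀ (columns : List (String × String × String)) (override : Option String), Dom_pick_recency_column columns override → Spec_pick_recency_column columns override (pick_recency_column columns override)

-- ===== LEMMAS AND PROOFS =====

-- right-biased "keep the smaller rank, the right argument on ties" combiner
def mergeR (a r : Option (Int × String)) : Option (Int × String) :=
  match r with
  | none => a
  | some (i, _) => match a with
    | none => r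
    | some (j, _) => if i ≤ j then r else a

-- index of s in ks, counting from i (first occurrence)
def idxAux (i : Int) (ks : List String) (s : String) : Option Int :=
  match ks with
  | [] => none
  | k :: ks => if s = k then some i else idxAux (i + 1) ks s

-- last column whose lowered name is k
def lastMatch (k : String) (xs : List (String × String × String)) : Option String :=
  match xs with
  | [] => none
  | c :: xs => match lastMatch k xs with
    | some v => some v
    | none => if PySem.Str.lower c.1 = k then some c.1 else none

-- A's candidate loop, abstracted: first candidate (from index i) present among the columns
def pickRaux (i : Int) (ks : List String) (xs : List (String × String × String)) : Option (Int × String) :=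
  match ks with
  | [] => none
  | k :: ks => match lastMatch k xs with
    | some v => some (i, v)
    | none => pickRaux (i + 1) ks xs

-- B's answer, structurally on the columns
def bestAux (i : Int) (ks : List String) (xs : List (String × String × String)) : Option (Int × String) :=
  match xs with
  | [] => none
  | c :: xs => mergeR ((idxAux i ks (PySem.Str.lower c.1)).map (fun j => (j, c.1))) (bestAux i ks xs)

theorem mergeR_none_left (x : Option (Int × String)) : mergeR none x = x := by
  cases x with
  | none => rfl
  | some p => cases p; rfl

theorem mergeR_assoc (a b r : Option (Int × String)) :
    mergeR (mergeR a b) r = mergeR a (mergeR b r) := by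
  cases r with
  | none => rfl
  | some pr =>
    cases b with
    | none => rfl
    | some pb =>
      cases a with
      | none => simp [mergeR_none_left]
      | some pa =>
        obtain ⟨i, v⟩ := pr; obtain ⟨j, w⟩ := pb; obtain ⟨k, u⟩ := pa
        by_cases h1 : i ≤ j <;> by_cases h2 : j ≤ k <;> by_cases h3 : i ≤ k <;>
          simp [mergeR, h1, h2, h3] <;> omega

theorem idxAux_ge (ks : List String) (i : Int) (s : String) (j : Int)
    (h : idxAux i ks s = some j) : i ≤ j := by
  induction ks generalizing i with
  | nil => simp [idxAux] at h
  | cons k ks ih =>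
    simp only [idxAux] at h
    split at h
    · simp only [Option.some.injEq] at h; omega
    · have := ih (i + 1) h; omega

theorem pickRaux_ge (ks : List String) (i : Int) (xs : List (String × String × String))
    (j : Int) (v : String) (h : pickRaux i ks xs = some (j, v)) : i ≤ j := by
  induction ks generalizing i with
  | nil => simp [pickRaux] at h
  | cons k ks ih =>
    simp only [pickRaux] at h
    split at h
    · simp at h; omega
    · have := ih (i + 1) h; omega

theorem pickRaux_nil (ks : List String) (i : Int) : pickRaux i ks [] = none := by
  induction ks generalizing i with
  | nil => rfl
  | cons k ks ih => simp [pickRaux, lastMatch, ih]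

theorem pickRaux_cons (ks : List String) (i : Int) (c : String × String × String)
    (xs : List (String × String × String)) :
    pickRaux i ks (c :: xs) =
      mergeR ((idxAux i ks (PySem.Str.lower c.1)).map (fun j => (j, c.1))) (pickRaux i ks xs) := by
  induction ks generalizing i with
  | nil => rfl
  | cons k ks ih =>
    cases hm : lastMatch k xs with
    | some v =>
      have hlm : lastMatch k (c :: xs) = some v := by simp [lastMatch, hm]
      by_cases hc : PySem.Str.lower c.1 = k
      · simp only [pickRaux, hlm, hm, idxAux, if_pos hc, Option.map_some]
        simp [mergeR]
      · simp only [pickRaux, hlm, hm, idxAux, if_neg hc]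
        cases hx : idxAux (i + 1) ks (PySem.Str.lower c.1) with
        | none => simp [mergeR]
        | some j =>
          have hij : i + 1 ≤ j := idxAux_ge _ _ _ _ hx
          simp only [Option.map_some, mergeR]
          rw [if_pos (by omega)]
    | none =>
      by_cases hc : PySem.Str.lower c.1 = k
      · have hlm : lastMatch k (c :: xs) = some c.1 := by simp [lastMatch, hm, hc]
        simp only [pickRaux, hlm, hm, idxAux, if_pos hc, Option.map_some]
        cases hr : pickRaux (i + 1) ks xs with
        | none => simp [mergeR]
        | some p =>
          obtain ⟨j, w⟩ := p
          have hij : i + 1 ≤ j := pickRaux_ge _ _ _ _ _ hr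
          simp only [mergeR]
          rw [if_neg (by omega)]
      · have hlm : lastMatch k (c :: xs) = none := by simp [lastMatch, hm, hc]
        simp only [pickRaux, hlm, hm, idxAux, if_neg hc]
        exact ih (i + 1)

theorem pickRaux_eq_bestAux (xs : List (String × String × String)) (i : Int) (ks : List String) :
    pickRaux i ks xs = bestAux i ks xs := by
  induction xs with
  | nil => simp [bestAux, pickRaux_nil]
  | cons c xs ih => rw [bestAux, pickRaux_cons, ih]

theorem names_get? (xs : List (String × String × String)) (d : PySem.Dict String String)
    (k : String) :
    (xs.foldl (fun d c => d.insert (PySem.Str.lower c.1) c.1) d).get? k =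
      match lastMatch k xs with
      | some v => some v
      | none => d.get? k := by
  induction xs generalizing d with
  | nil => simp [lastMatch]
  | cons c xs ih =>
    simp only [List.foldl_cons, ih]
    cases hm : lastMatch k xs with
    | some v => simp [lastMatch, hm]
    | none =>
      simp only [lastMatch, hm]
      by_cases hc : PySem.Str.lower c.1 = k
      · simp [hc]
      · have hk : ¬ (k = PySem.Str.lower c.1) := fun h => hc h.symm
        simp [PySem.Dict.get?_insert, hc, hk]

theorem loopA_eq_pickRaux (ks : List String) (i : Int) (xs : List (String × String × String)) :
    pickA_loop ks (pickA_names xs) = (pickRaux i ks xs).map (·.2) := by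
  induction ks generalizing i with
  | nil => rfl
  | cons k ks ih =>
    simp only [pickA_loop, pickRaux, pickA_names, names_get?]
    cases hm : lastMatch k xs with
    | some v => simp
    | none => simpa using ih (i + 1)

theorem rank_get (s : String) : pickB_rank.get? s = idxAux 0 RECENCY_CANDIDATES s := by
  have h : pickB_rank = PySem.Dict.mk [("created_at", (0 : Int)), ("updated_at", 1),
      ("event_time", 2), ("_ts", 3), ("ts", 4), ("created", 5), ("updated", 6)] := by decide
  rw [h]
  simp only [RECENCY_CANDIDATES, idxAux, PySem.Dict.get?_mk_cons, beq_iff_eq]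
  by_cases h1 : s = "created_at"
  · simp [h1]
  rw [if_neg (fun hh => h1 hh.symm), if_neg h1]
  by_cases h2 : s = "updated_at"
  · simp [h2]
  rw [if_neg (fun hh => h2 hh.symm), if_neg h2]
  by_cases h3 : s = "event_time"
  · simp [h3]
  rw [if_neg (fun hh => h3 hh.symm), if_neg h3]
  by_cases h4 : s = "_ts"
  · simp [h4]
  rw [if_neg (fun hh => h4 hh.symm), if_neg h4]
  by_cases h5 : s = "ts"
  · simp [h5]
  rw [if_neg (fun hh => h5 hh.symm), if_neg h5]
  by_cases h6 : s = "created"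
  · simp [h6]
  rw [if_neg (fun hh => h6 hh.symm), if_neg h6]
  by_cases h7 : s = "updated"
  · simp [h7]
  rw [if_neg (fun hh => h7 hh.symm), if_neg h7]
  simp [PySem.Dict.get?]

theorem step_eq_mergeR (best : Option (Int × String)) (c : String × String × String) :
    pickB_step best c =
      mergeR best ((idxAux 0 RECENCY_CANDIDATES (PySem.Str.lower c.1)).map (fun j => (j, c.1))) := by
  simp only [pickB_step, rank_get]
  cases hx : idxAux 0 RECENCY_CANDIDATES (PySem.Str.lower c.1) with
  | none => cases best <;> rfl
  | some i =>
    cases best with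
    | none => rfl
    | some p => obtain ⟨j, u⟩ := p; simp [mergeR]

theorem foldB_eq_bestAux (xs : List (String × String × String)) (best : Option (Int × String)) :
    xs.foldl pickB_step best = mergeR best (bestAux 0 RECENCY_CANDIDATES xs) := by
  induction xs generalizing best with
  | nil => rfl
  | cons c xs ih =>
    rw [List.foldl_cons, ih, step_eq_mergeR, mergeR_assoc, bestAux]

-- ===== VERDICT (by name: the statement is the Claim_ definition above) =====
theorem pick_recency_column_spec : Claim_equal_pick_recency_column := by
  intro columns override _
  unfold Spec_pick_recency_column pick_recency_column pick_recency_column_alt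
  by_cases h : (override.getD "") ≠ ""
  · simp [h]
  · simp only [h]
    simp [loopA_eq_pickRaux RECENCY_CANDIDATES 0, pickRaux_eq_bestAux,
      foldB_eq_bestAux, mergeR_none_left]
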